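-- pv_equiv track=rewrite | github.com/rcghpge/aoc-proofing-repo | 2024-cheat-sheet/day-18/day-18.py | simulate_falling_bytes
-- ===== SOURCE A (Python) =====
-- def simulate_falling_bytes(grid_size, byte_positions, num_bytes):
--     """Simulates falling bytes and returns the grid after the specified number of bytes."""
--     grid = [[0 for _ in range(grid_size)] for _ in range(grid_size)]
--
--     for i, (x, y) in enumerate(byte_positions):
--         if i >= num_bytes:
--             break
--         if 0 <= x < grid_size and 0 <= y < grid_size:  # Skip out-of-bound coordinates
--             grid[y][x] = 1  # Mark the position as corrupted
--
--     return grid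
-- ===== SOURCE B (Python) =====
-- def simulate_falling_bytes(grid_size, byte_positions, num_bytes):
--     """Group fallen in-bounds bytes by row, then emit each row as zero-runs
--     separated by 1s at the row's sorted distinct corrupted x-coordinates."""
--     rows = {}
--     for x, y in byte_positions[:max(num_bytes, 0)]:
--         if 0 <= x < grid_size and 0 <= y < grid_size:
--             rows.setdefault(y, set()).add(x)
--     grid = []
--     for y in range(grid_size):
--         row = []
--         prev = 0
--         for x in sorted(rows.get(y, ())):
--             row += [0] * (x - prev)
--             row.append(1)
--             prev = x + 1
--         row += [0] * (grid_size - prev)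
--         grid.append(row)
--     return grid
-- ===== Notes on version B (the rewrite author's own statement) =====
-- stated objective: alternative
-- what changed: A allocates a zero grid and scatter-writes a 1 at each fallen in-bounds byte; B never touches a prebuilt grid: it groups the fallen bytes by row into a dict of x-coordinate sets, then emits each row from scratch as runs of zeros separated by 1s at that row's sorted distinct x-coordinates.
import Mathlib
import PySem

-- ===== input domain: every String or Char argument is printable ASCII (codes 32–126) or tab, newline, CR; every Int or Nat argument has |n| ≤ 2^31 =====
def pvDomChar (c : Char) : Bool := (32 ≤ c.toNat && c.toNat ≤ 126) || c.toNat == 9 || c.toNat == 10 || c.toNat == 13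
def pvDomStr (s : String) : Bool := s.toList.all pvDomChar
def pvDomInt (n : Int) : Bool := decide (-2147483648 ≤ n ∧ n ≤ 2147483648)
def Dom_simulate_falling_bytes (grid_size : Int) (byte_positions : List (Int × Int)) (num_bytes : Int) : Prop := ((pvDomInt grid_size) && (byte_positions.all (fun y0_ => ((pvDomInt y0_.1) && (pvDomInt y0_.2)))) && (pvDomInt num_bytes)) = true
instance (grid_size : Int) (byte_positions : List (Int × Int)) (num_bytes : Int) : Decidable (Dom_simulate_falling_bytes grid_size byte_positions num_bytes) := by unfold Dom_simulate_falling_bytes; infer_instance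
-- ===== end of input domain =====

-- B groups the fallen in-bounds bytes by row into a dict of x-coordinate sets and
-- emits each row from scratch as zero-runs separated by 1s at the sorted distinct
-- x-coordinates, instead of A's zero grid with scatter-writes (alternative
-- decomposition, similar cost; return value only).

-- ===== PORT A =====
-- the 'for i, (x, y) in enumerate(byte_positions): … break …' loop of A
def pvLoopA (grid_size num_bytes : Int) : List (Int × Int) → Int → List (List Int) → List (List Int)
  | [], _, grid => grid
  | (x, y) :: rest, i, grid =>
    if num_bytes ≤ i then grid
    else if 0 ≤ x ∧ x < grid_size ∧ 0 ≤ y ∧ y < grid_size then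
      pvLoopA grid_size num_bytes rest (i + 1)
        (PySem.List.pySetD grid y (PySem.List.pySetD (PySem.List.pyGetD grid y []) x 1))
    else pvLoopA grid_size num_bytes rest (i + 1) grid

def simulate_falling_bytes (grid_size : Int) (byte_positions : List (Int × Int)) (num_bytes : Int) : List (List Int) :=
  let grid := (PySem.List.pyRange 0 grid_size 1).map
    (fun _ => (PySem.List.pyRange 0 grid_size 1).map (fun _ => (0 : Int)))
  pvLoopA grid_size num_bytes byte_positions 0 grid

-- ===== PORT B =====
-- B's first loop: 'for x, y in byte_positions[:max(num_bytes, 0)]: … rows.setdefault(y, set()).add(x)'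
def pvFillB (grid_size : Int) : List (Int × Int) → PySem.Dict Int (PySem.Set Int) → PySem.Dict Int (PySem.Set Int)
  | [], d => d
  | (x, y) :: rest, d =>
    if 0 ≤ x ∧ x < grid_size ∧ 0 ≤ y ∧ y < grid_size then
      pvFillB grid_size rest (d.modify y PySem.Set.empty (fun s => PySem.Set.add s x))
    else pvFillB grid_size rest d

-- B's inner loop: 'for x in sorted(…): row += [0]*(x-prev); row.append(1); prev = x+1'
def pvRowLoopB (grid_size : Int) : List Int → List Int → Int → List Int
  | [], row, prev => row ++ PySem.List.pyRepeat [0] (grid_size - prev)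
  | x :: rest, row, prev =>
    pvRowLoopB grid_size rest (row ++ PySem.List.pyRepeat [0] (x - prev) ++ [1]) (x + 1)

def simulate_falling_bytes_alt (grid_size : Int) (byte_positions : List (Int × Int)) (num_bytes : Int) : List (List Int) :=
  let rows := pvFillB grid_size
    (PySem.List.slice byte_positions none (some (max num_bytes 0))) PySem.Dict.empty
  (PySem.List.pyRange 0 grid_size 1).map (fun y =>
    pvRowLoopB grid_size
      (PySem.List.sorted (rows.getD y PySem.Set.empty) (fun x => x) false) [] 0)

-- ===== PRECONDITION & SPEC =====
def Spec_simulate_falling_bytes (grid_size : Int) (byte_positions : List (Int × Int)) (num_bytes : Int) (out : List (List Int)) : Prop := out = simulate_falling_bytes_alt grid_size byte_positions num_bytes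
instance (grid_size : Int) (byte_positions : List (Int × Int)) (num_bytes : Int) (out : List (List Int)) : Decidable (Spec_simulate_falling_bytes grid_size byte_positions num_bytes out) := by unfold Spec_simulate_falling_bytes; infer_instance

-- ===== CLAIM (what is proved, stated in full; the proofs are below) =====
def Claim_equal_simulate_falling_bytes : Prop := ∀ (grid_size : Int) (byte_positions : List (Int × Int)) (num_bytes : Int), Dom_simulate_falling_bytes grid_size byte_positions num_bytes → Spec_simulate_falling_bytes grid_size byte_positions num_bytes (simulate_falling_bytes grid_size byte_positions num_bytes)

-- ===== LEMMAS AND PROOFS =====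

-- A-side abstraction: the set of corrupted positions A's loop marks
def pvCollectB (grid_size num_bytes : Int) : List (Int × Int) → Int → PySem.Set (Int × Int) → PySem.Set (Int × Int)
  | [], _, s => s
  | (x, y) :: rest, i, s =>
    if num_bytes ≤ i then s
    else if 0 ≤ x ∧ x < grid_size ∧ 0 ≤ y ∧ y < grid_size then
      pvCollectB grid_size num_bytes rest (i + 1) (PySem.Set.add s (x, y))
    else pvCollectB grid_size num_bytes rest (i + 1) s

-- the grid described by a membership set
def pvMkGrid (grid_size : Int) (s : PySem.Set (Int × Int)) : List (List Int) :=
  (PySem.List.pyRange 0 grid_size 1).map (fun y =>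
    (PySem.List.pyRange 0 grid_size 1).map (fun x =>
      if PySem.Set.contains s (x, y) then 1 else 0))

lemma pvMkGrid_empty (grid_size : Int) :
    pvMkGrid grid_size PySem.Set.empty
      = (PySem.List.pyRange 0 grid_size 1).map
          (fun _ => (PySem.List.pyRange 0 grid_size 1).map (fun _ => (0 : Int))) := by
  simp [pvMkGrid, PySem.Set.empty]

-- adding an element only changes membership at that element
lemma pvContainsAdd (s : PySem.Set (Int × Int)) (p q : Int × Int) (h : p ≠ q) :
    PySem.Set.contains (PySem.Set.add s q) p = PySem.Set.contains s p := by
  rw [Bool.eq_iff_iff]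
  simp [PySem.Set.mem_add, h]

lemma pvContainsAddSelf (s : PySem.Set (Int × Int)) (q : Int × Int) :
    (if PySem.Set.contains (PySem.Set.add s q) q then (1 : Int) else 0) = 1 := by
  simp [PySem.Set.mem_add]

lemma pvSetCell (grid_size x y : Int) (hx0 : 0 ≤ x)
    (hy0 : 0 ≤ y) (hy1 : y < grid_size) (s : PySem.Set (Int × Int)) :
    PySem.List.pySetD (pvMkGrid grid_size s) y
        (PySem.List.pySetD (PySem.List.pyGetD (pvMkGrid grid_size s) y []) x 1)
      = pvMkGrid grid_size (PySem.Set.add s (x, y)) := by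
  unfold pvMkGrid
  rw [PySem.List.pyGetD_map_pyRange_of_nonneg _ _ _ _ hy0 hy1,
      PySem.List.pySetD_of_nonneg _ _ hx0, PySem.List.pySetD_of_nonneg _ _ hy0]
  apply List.ext_getElem
  · simp
  · intro k h1 h2
    simp only [List.length_set, List.length_map, PySem.List.length_pyRange_one] at h1 h2
    simp only [List.getElem_set, List.getElem_map, PySem.List.getElem_pyRange_one, zero_add]
    by_cases hk : y.toNat = k
    · simp only [if_pos hk]
      have hky : (k : Int) = y := by omega
      rw [hky]
      apply List.ext_getElem
      · simp
      · intro j j1 j2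
        simp only [List.length_set, List.length_map, PySem.List.length_pyRange_one] at j1 j2
        simp only [List.getElem_set, List.getElem_map, PySem.List.getElem_pyRange_one, zero_add]
        by_cases hj : x.toNat = j
        · simp only [if_pos hj]
          have hjx : (j : Int) = x := by omega
          rw [hjx]
          exact (pvContainsAddSelf s (x, y)).symm
        · simp only [if_neg hj]
          have hne : ((j : Int), y) ≠ (x, y) := by
            intro h; apply hj; have := congrArg Prod.fst h; simp only at this; omega
          rw [pvContainsAdd _ _ _ hne]
    · simp only [if_neg hk]
      apply List.map_congr_left
      intro x' _
      have hne : (x', (k : Int)) ≠ (x, y) := by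
        intro h; apply hk; have := congrArg Prod.snd h; simp only at this; omega
      rw [pvContainsAdd _ _ _ hne]

-- A's loop, on a grid described by a set, is set collection
lemma pvLoop_eq (grid_size num_bytes : Int) :
    ∀ (bp : List (Int × Int)) (i : Int) (s : PySem.Set (Int × Int)),
      pvLoopA grid_size num_bytes bp i (pvMkGrid grid_size s)
        = pvMkGrid grid_size (pvCollectB grid_size num_bytes bp i s) := by
  intro bp
  induction bp with
  | nil => intro i s; simp [pvLoopA, pvCollectB]
  | cons p rest ih =>
    intro i s
    obtain ⟨x, y⟩ := p
    by_cases hb : num_bytes ≤ i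
    · simp [pvLoopA, pvCollectB, hb]
    · by_cases hin : 0 ≤ x ∧ x < grid_size ∧ 0 ≤ y ∧ y < grid_size
      · simp only [pvLoopA, pvCollectB, if_neg hb, if_pos hin]
        rw [pvSetCell grid_size x y hin.1 hin.2.2.1 hin.2.2.2 s, ih]
      · simp only [pvLoopA, pvCollectB, if_neg hb, if_neg hin]
        exact ih (i + 1) s

-- membership in A's collected set
lemma pvCollect_mem (grid_size num_bytes : Int) :
    ∀ (bp : List (Int × Int)) (i : Int) (s : PySem.Set (Int × Int)) (px py : Int),
      (px, py) ∈ pvCollectB grid_size num_bytes bp i s ↔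
        (px, py) ∈ s ∨ ((px, py) ∈ bp.take (num_bytes - i).toNat ∧
          0 ≤ px ∧ px < grid_size ∧ 0 ≤ py ∧ py < grid_size) := by
  intro bp
  induction bp with
  | nil => intro i s px py; simp [pvCollectB]
  | cons q rest ih =>
    intro i s px py
    obtain ⟨x, y⟩ := q
    by_cases hb : num_bytes ≤ i
    · have h0 : (num_bytes - i).toNat = 0 := by omega
      simp [pvCollectB, hb, h0]
    · have hk : (num_bytes - i).toNat = (num_bytes - (i + 1)).toNat + 1 := by omega
      rw [hk]
      by_cases hin : 0 ≤ x ∧ x < grid_size ∧ 0 ≤ y ∧ y < grid_size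
      · simp only [pvCollectB, if_neg hb, if_pos hin, ih, PySem.Set.mem_add,
          List.take_succ_cons, List.mem_cons, Prod.mk.injEq]
        constructor
        · rintro ((h | ⟨hx, hy⟩) | ⟨h, hbnd⟩)
          · exact Or.inl h
          · subst hx; subst hy; exact Or.inr ⟨Or.inl ⟨rfl, rfl⟩, hin⟩
          · exact Or.inr ⟨Or.inr h, hbnd⟩
        · rintro (h | ⟨⟨hx, hy⟩ | h, hbnd⟩)
          · exact Or.inl (Or.inl h)
          · subst hx; subst hy; exact Or.inl (Or.inr ⟨rfl, rfl⟩)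
          · exact Or.inr ⟨h, hbnd⟩
      · simp only [pvCollectB, if_neg hb, if_neg hin, ih, List.take_succ_cons,
          List.mem_cons, Prod.mk.injEq]
        constructor
        · rintro (h | ⟨h, hbnd⟩)
          · exact Or.inl h
          · exact Or.inr ⟨Or.inr h, hbnd⟩
        · rintro (h | ⟨⟨hx, hy⟩ | h, hbnd⟩)
          · exact Or.inl h
          · exfalso; subst hx; subst hy; exact hin hbnd
          · exact Or.inr ⟨h, hbnd⟩

-- membership and nodup of the row sets B's dict loop builds
lemma pvFill_mem (grid_size : Int) :
    ∀ (L : List (Int × Int)) (d : PySem.Dict Int (PySem.Set Int)),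
      (∀ y : Int, ((d.getD y PySem.Set.empty) : List Int).Nodup) →
      (∀ y : Int, (((pvFillB grid_size L d).getD y PySem.Set.empty) : List Int).Nodup) ∧
      (∀ x y : Int, x ∈ (pvFillB grid_size L d).getD y PySem.Set.empty ↔
        x ∈ d.getD y PySem.Set.empty ∨
          ((x, y) ∈ L ∧ 0 ≤ x ∧ x < grid_size ∧ 0 ≤ y ∧ y < grid_size)) := by
  intro L
  induction L with
  | nil => intro d hd; exact ⟨hd, by simp [pvFillB]⟩
  | cons q rest ih =>
    intro d hd
    obtain ⟨x0, y0⟩ := q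
    by_cases hin : 0 ≤ x0 ∧ x0 < grid_size ∧ 0 ≤ y0 ∧ y0 < grid_size
    · have hd' : ∀ y : Int,
          (((d.modify y0 PySem.Set.empty (fun s => PySem.Set.add s x0)).getD y
            PySem.Set.empty : List Int)).Nodup := by
        intro y
        rw [PySem.Dict.getD_modify]
        by_cases hy : y = y0
        · simp only [if_pos hy]
          exact PySem.Set.nodup_add _ _ (hd y0)
        · simp only [if_neg hy]; exact hd y
      obtain ⟨h1, h2⟩ := ih _ hd'
      refine ⟨by simpa [pvFillB, hin] using h1, ?_⟩
      intro x y
      simp only [pvFillB, if_pos hin]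
      rw [h2 x y, PySem.Dict.getD_modify]
      simp only [List.mem_cons, Prod.mk.injEq]
      by_cases hy : y = y0
      · subst hy
        rw [if_pos rfl]
        simp only [PySem.Set.mem_add]
        constructor
        · rintro ((h | h) | ⟨h, hbnd⟩)
          · exact Or.inl h
          · subst h; exact Or.inr ⟨Or.inl (by simp), hin⟩
          · exact Or.inr ⟨Or.inr h, hbnd⟩
        · rintro (h | ⟨⟨hx, _⟩ | h, hbnd⟩)
          · exact Or.inl (Or.inl h)
          · subst hx; exact Or.inl (Or.inr rfl)
          · exact Or.inr ⟨h, hbnd⟩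
      · simp only [if_neg hy]
        constructor
        · rintro (h | ⟨h, hbnd⟩)
          · exact Or.inl h
          · exact Or.inr ⟨Or.inr h, hbnd⟩
        · rintro (h | ⟨⟨_, hy'⟩ | h, hbnd⟩)
          · exact Or.inl h
          · exact absurd hy' hy
          · exact Or.inr ⟨h, hbnd⟩
    · obtain ⟨h1, h2⟩ := ih d hd
      refine ⟨by simpa [pvFillB, hin] using h1, ?_⟩
      intro x y
      simp only [pvFillB, if_neg hin]
      rw [h2 x y]
      simp only [List.mem_cons, Prod.mk.injEq]
      constructor
      · rintro (h | ⟨h, hbnd⟩)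
        · exact Or.inl h
        · exact Or.inr ⟨Or.inr h, hbnd⟩
      · rintro (h | ⟨⟨hx, hy'⟩ | h, hbnd⟩)
        · exact Or.inl h
        · exfalso; subst hx; subst hy'; exact hin hbnd
        · exact Or.inr ⟨h, hbnd⟩

-- B's row loop on a strictly increasing, bounded list is a membership sweep
lemma pvRowLoop_eq (grid_size : Int) :
    ∀ (xs : List Int) (row : List Int) (a : Int),
      xs.Pairwise (· < ·) → (∀ x ∈ xs, a ≤ x) → (∀ x ∈ xs, x < grid_size) →
      pvRowLoopB grid_size xs row a
        = row ++ (PySem.List.pyRange a grid_size 1).map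
            (fun x => if x ∈ xs then (1 : Int) else 0) := by
  intro xs
  induction xs with
  | nil =>
    intro row a _ _ _
    simp only [pvRowLoopB, List.not_mem_nil, if_false]
    congr 1
    rw [PySem.List.pyRepeat_singleton, List.map_const', PySem.List.length_pyRange_one]
  | cons x rest ih =>
    intro row a hp hlo hhi
    have hax : a ≤ x := hlo x (List.mem_cons_self)
    have hxg : x < grid_size := hhi x (List.mem_cons_self)
    have hrest : ∀ v ∈ rest, x < v := (List.pairwise_cons.mp hp).1
    rw [PySem.List.pyRange_one_append a x grid_size hax (le_of_lt hxg),
        PySem.List.pyRange_one_cons hxg]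
    simp only [List.map_append, List.map_cons]
    have hhead : ((PySem.List.pyRange a x 1).map fun v => if v ∈ x :: rest then (1 : Int) else 0)
        = List.replicate (x - a).toNat 0 := by
      rw [List.map_congr_left (g := fun _ => (0 : Int)) ?_]
      · rw [List.map_const', PySem.List.length_pyRange_one]
      · intro v hv
        have hv' := (PySem.List.mem_pyRange_one).mp hv
        have : v ∉ x :: rest := by
          simp only [List.mem_cons, not_or]
          exact ⟨by omega, fun hm => by have := hrest v hm; omega⟩
        simp [this]
    have hself : (if x ∈ x :: rest then (1 : Int) else 0) = 1 := by simp
    have htail : ((PySem.List.pyRange (x + 1) grid_size 1).map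
          fun v => if v ∈ x :: rest then (1 : Int) else 0)
        = (PySem.List.pyRange (x + 1) grid_size 1).map
            fun v => if v ∈ rest then (1 : Int) else 0 := by
      apply List.map_congr_left
      intro v hv
      have hv' := (PySem.List.mem_pyRange_one).mp hv
      have : (v ∈ x :: rest) ↔ (v ∈ rest) := by
        simp only [List.mem_cons]
        constructor
        · rintro (h | h)
          · omega
          · exact h
        · exact Or.inr
      simp [this]
    rw [hhead, hself, htail]
    show pvRowLoopB grid_size rest (row ++ PySem.List.pyRepeat [0] (x - a) ++ [1]) (x + 1) = _
    rw [ih (row ++ PySem.List.pyRepeat [0] (x - a) ++ [1]) (x + 1)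
        (List.pairwise_cons.mp hp).2
        (fun v hv => by have := hrest v hv; omega)
        (fun v hv => hhi v (List.mem_cons_of_mem _ hv))]
    rw [PySem.List.pyRepeat_singleton]
    simp [List.append_assoc]

-- ===== VERDICT (by name: the statement is the Claim_ definition above) =====
theorem simulate_falling_bytes_spec : Claim_equal_simulate_falling_bytes := by
  intro gs bp nb _
  unfold Spec_simulate_falling_bytes simulate_falling_bytes simulate_falling_bytes_alt
  rw [← pvMkGrid_empty, pvLoop_eq]
  show pvMkGrid gs (pvCollectB gs nb bp 0 PySem.Set.empty)
      = (PySem.List.pyRange 0 gs 1).map (fun y =>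
          pvRowLoopB gs
            (PySem.List.sorted
              ((pvFillB gs (PySem.List.slice bp none (some (max nb 0)))
                PySem.Dict.empty).getD y PySem.Set.empty) (fun x => x) false) [] 0)
  have hLtake : PySem.List.slice bp none (some (max nb 0)) = bp.take (nb - 0).toNat := by
    rw [PySem.List.slice_to bp (by omega : (0 : Int) ≤ max nb 0)]
    congr 1
    omega
  have hfill := pvFill_mem gs (PySem.List.slice bp none (some (max nb 0))) PySem.Dict.empty
    (by intro y; simp [PySem.Dict.getD_empty, PySem.Set.empty])
  unfold pvMkGrid
  apply List.map_congr_left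
  intro y hy
  have hy' := (PySem.List.mem_pyRange_one).mp hy
  have hnd_rs := hfill.1 y
  have hperm := PySem.List.sorted_perm
    ((pvFillB gs (PySem.List.slice bp none (some (max nb 0)))
      PySem.Dict.empty).getD y PySem.Set.empty) (fun x : Int => x) false
  have hnd_xs := hperm.nodup_iff.mpr hnd_rs
  have hle := PySem.List.sorted_pairwise
    ((pvFillB gs (PySem.List.slice bp none (some (max nb 0)))
      PySem.Dict.empty).getD y PySem.Set.empty) (fun x : Int => x)
  have hlt : (PySem.List.sorted
      ((pvFillB gs (PySem.List.slice bp none (some (max nb 0)))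
        PySem.Dict.empty).getD y PySem.Set.empty) (fun x : Int => x) false).Pairwise (· < ·) :=
    (hle.and hnd_xs).imp (fun h => lt_of_le_of_ne h.1 h.2)
  have hmem : ∀ v : Int, v ∈ PySem.List.sorted
      ((pvFillB gs (PySem.List.slice bp none (some (max nb 0)))
        PySem.Dict.empty).getD y PySem.Set.empty) (fun x : Int => x) false ↔
      (v, y) ∈ pvCollectB gs nb bp 0 PySem.Set.empty := by
    intro v
    rw [PySem.List.mem_sorted, hfill.2 v y, pvCollect_mem, hLtake]
    simp [PySem.Dict.getD_empty, PySem.Set.empty]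
  rw [pvRowLoop_eq gs _ [] 0 hlt
      (fun v hv => ((pvCollect_mem gs nb bp 0 PySem.Set.empty v y).mp
        ((hmem v).mp hv)).elim (by simp [PySem.Set.empty]) (fun h => h.2.1))
      (fun v hv => ((pvCollect_mem gs nb bp 0 PySem.Set.empty v y).mp
        ((hmem v).mp hv)).elim (by simp [PySem.Set.empty]) (fun h => h.2.2.1)),
    List.nil_append]
  apply List.map_congr_left
  intro v _
  by_cases hc : (v, y) ∈ pvCollectB gs nb bp 0 PySem.Set.empty
  · have h1 : PySem.Set.contains (pvCollectB gs nb bp 0 PySem.Set.empty) (v, y) = true := by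
      simp only [PySem.Set.contains_iff]; exact hc
    rw [if_pos h1, if_pos ((hmem v).mpr hc)]
  · have h1 : ¬ PySem.Set.contains (pvCollectB gs nb bp 0 PySem.Set.empty) (v, y) = true := by
      simp only [PySem.Set.contains_iff]; exact hc
    rw [if_neg h1, if_neg (fun h => hc ((hmem v).mp h))]
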